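-- pv_equiv track=rewrite | github.com/jack-chaudier/stark | scripts/runtime_collapse_boundary.py | basis_exact_and_essential
-- ===== SOURCE A (Python) =====
-- from typing import DefaultDict, Dict, Iterable, List, Sequence, Tuple
--
-- Family = Tuple[Tuple[int, ...], ...]
--
-- def tuple_to_mask(items: Iterable[int]) -> int:
--     mask = 0
--     for item in items:
--         mask |= 1 << (item - 1)
--     return mask
--
-- def family_union(family: Family) -> Tuple[int, ...]:
--     if not family:
--         return ()
--     return tuple(sorted(set().union(*map(set, family))))
--
-- def restrict_family_mask(family: Family, survivor_mask: int) -> Family: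
--     return tuple(
--         edge
--         for edge in family
--         if tuple_to_mask(edge) & survivor_mask == tuple_to_mask(edge)
--     )
--
-- def family_variable_union(family: Family) -> Tuple[int, ...]:
--     return family_union(family)
--
-- def contract_projection_signature(family: Family, probe_masks: Sequence[int], projection: str, p: int) -> Tuple[object, ...]:
--     signature: List[object] = []
--     for probe_mask in probe_masks:
--         restricted = restrict_family_mask(family, probe_mask)
--         if projection == "answer":
--             signature.append("feasible" if restricted else "blocked")
--         elif projection == "variable":
--             signature.append(family_variable_union(restricted))
--         elif projection == "family":
--             signature.append(restricted)
--         else: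
--             raise ValueError(f"unknown projection: {projection}")
--     return tuple(signature)
--
-- def basis_exact_and_essential(
--     families: Sequence[Family],
--     probe_masks: Sequence[int],
--     projection: str,
--     p: int,
-- ) -> Dict[str, object]:
--     signatures_by_probe = [
--         tuple(
--             contract_projection_signature(family, [probe_mask], projection, p)[0]
--             for family in families
--         )
--         for probe_mask in probe_masks
--     ]
--     full_unique = len(set(zip(*signatures_by_probe))) == len(families) if probe_masks else len(families) <= 1
--     essential = True
--     if full_unique:
--         for index in range(len(probe_masks)):
--             reduced = [column for col_index, column in enumerate(signatures_by_probe) if col_index != index]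
--             if len(set(zip(*reduced))) == len(families):
--                 essential = False
--                 break
--     else:
--         essential = False
--     return {
--         "exact": full_unique,
--         "essential": essential,
--     }
-- ===== SOURCE B (Python) =====
-- def _mask(edge):
--     mask = 0
--     for item in edge:
--         mask |= 1 << (item - 1)
--     return mask
--
-- def _sig(family, probe_mask, projection):
--     restricted = tuple(e for e in family if _mask(e) & probe_mask == _mask(e))
--     if projection == "answer":
--         return "feasible" if restricted else "blocked"
--     if projection == "variable":
--         return tuple(sorted({v for e in restricted for v in e})) if restricted else ()
--     if projection == "family":
--         return restricted
--     raise ValueError(f"unknown projection: {projection}")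
--
-- def basis_exact_and_essential(families, probe_masks, projection, p):
--     # one full signature row per family (family-major, not probe-major)
--     rows = [tuple(_sig(fam, m, projection) for m in probe_masks) for fam in families]
--     exact = (len(set(rows)) == len(families)) if probe_masks else len(families) <= 1
--     essential = False
--     if exact:
--         # all rows distinct: dropping probe i breaks distinctness iff some
--         # pair of rows differs in exactly position i
--         marked = set()
--         for ai, ra in enumerate(rows):
--             for rb in rows[ai + 1:]:
--                 diffs = [i for i, (x, y) in enumerate(zip(ra, rb)) if x != y]
--                 if len(diffs) == 1:
--                     marked.add(diffs[0])
--         essential = len(marked) == len(probe_masks)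
--     return {"exact": exact, "essential": essential}
-- ===== Notes on version B (the rewrite author's own statement) =====
-- stated objective: alternative
-- what changed: B builds one full signature row per family and decides essentiality by a single pairwise sweep (a probe is essential iff some pair of families differs in exactly that position), instead of A's probe-major columns, zip-transpose and P separate leave-one-out global distinctness scans.
-- intended difference: On inputs with exactly one family and exactly one probe mask A returns essential=True (its leave-one-out test compares zip() of no columns, 0 != 1), although by A's own zero-probe convention a single family is distinguished with no probes at all, so the lone probe is not needed; B returns essential=False, the intended value. — e.g. on basis_exact_and_essential([[[1]]], [1], "answer", 0): A returns [("exact", true), ("essential", true)], B returns [("exact", true), ("essential", false)]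
import Mathlib
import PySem

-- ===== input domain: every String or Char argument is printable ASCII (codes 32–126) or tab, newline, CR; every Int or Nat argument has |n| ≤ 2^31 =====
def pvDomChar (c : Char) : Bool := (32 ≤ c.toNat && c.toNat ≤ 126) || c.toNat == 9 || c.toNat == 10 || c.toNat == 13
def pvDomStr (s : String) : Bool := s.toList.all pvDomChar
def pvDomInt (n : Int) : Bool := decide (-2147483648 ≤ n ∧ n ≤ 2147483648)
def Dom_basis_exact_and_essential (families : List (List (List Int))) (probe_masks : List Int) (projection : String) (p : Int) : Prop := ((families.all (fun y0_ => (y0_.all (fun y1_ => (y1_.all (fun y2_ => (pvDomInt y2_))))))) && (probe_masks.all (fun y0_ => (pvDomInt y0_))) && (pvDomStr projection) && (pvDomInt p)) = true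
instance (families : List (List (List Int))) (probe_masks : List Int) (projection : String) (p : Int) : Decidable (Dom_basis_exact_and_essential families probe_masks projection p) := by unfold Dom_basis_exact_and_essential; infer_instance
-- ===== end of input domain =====

-- B replaces A's probe-major columns + P leave-one-out distinctness scans by family-major
-- signature rows and one pairwise sole-distinguisher sweep (alternative decomposition, same cost class).


-- A Python signature element is heterogeneous (a str, a tuple of ints, or a tuple of edges);
-- PvSig is that disjoint union, compared by structural equality exactly as Python compares them.
inductive PvSig where
  | ans : String → PvSig
  | var : List Int → PvSig
  | fam : List (List Int) → PvSig
  | err : PvSig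
deriving DecidableEq, Repr

-- ===== PORT A =====
def tuple_to_mask (items : List Int) : Int :=
  -- 1 << (item - 1): Python raises on a negative shift; Pre_ keeps item ≥ 1, where .toNat is exact
  items.foldl (fun mask item => PySem.Int.bor mask ((1 : Int) <<< (item - 1).toNat)) 0

def restrict_family_mask (family : List (List Int)) (survivor_mask : Int) : List (List Int) :=
  family.filter (fun edge => PySem.Int.band (tuple_to_mask edge) survivor_mask = tuple_to_mask edge)

def family_union (family : List (List Int)) : List Int :=
  -- tuple(sorted(set().union(*map(set, family)))): the sorted list of the set of all members
  if family = [] then []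
  else PySem.List.sorted (PySem.Set.ofList family.flatten) (fun x => x) false

def contract_projection_signature (family : List (List Int)) (probe_masks : List Int)
    (projection : String) (p : Int) : List PvSig :=
  probe_masks.foldl (fun signature probe_mask =>
    let restricted := restrict_family_mask family probe_mask
    signature ++ [if projection = "answer" then
        PvSig.ans (if restricted = [] then "blocked" else "feasible")
      else if projection = "variable" then
        PvSig.var (family_union restricted)   -- family_variable_union = family_union
      else if projection = "family" then PvSig.fam restricted
      else PvSig.err]) []                     -- unknown projection: Python raises (outside Pre_)

-- zip(*cols): tuples truncated to the shortest column
def pvZipStar : List (List PvSig) → List (List PvSig)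
  | [] => []
  | [c] => c.map (fun x => [x])
  | c :: c' :: rest => List.zipWith (· :: ·) c (pvZipStar (c' :: rest))

-- the for-index/break loop computing `essential` once full_unique holds
def pvALoop (cols : List (List PvSig)) (nfam : Nat) : List Nat → Bool
  | [] => true
  | index :: rest =>
      let reduced := ((PySem.List.enumerate cols).filter (fun ci => ci.1 ≠ (index : Int))).map (·.2)
      if (PySem.Set.ofList (pvZipStar reduced)).length = nfam then false
      else pvALoop cols nfam rest

def basis_exact_and_essential (families : List (List (List Int))) (probe_masks : List Int) (projection : String) (p : Int) : List (String × Bool) :=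
  let signatures_by_probe := probe_masks.map (fun probe_mask =>
      families.map (fun family =>
        (contract_projection_signature family [probe_mask] projection p).headD PvSig.err))
  let full_unique := if probe_masks ≠ [] then
      decide ((PySem.Set.ofList (pvZipStar signatures_by_probe)).length = families.length)
    else decide (families.length ≤ 1)
  let essential := if full_unique then
      pvALoop signatures_by_probe families.length (List.range signatures_by_probe.length)
    else false
  [("exact", full_unique), ("essential", essential)]

-- ===== PORT B =====
def pvBMask (edge : List Int) : Int :=
  edge.foldl (fun mask item => PySem.Int.bor mask ((1 : Int) <<< (item - 1).toNat)) 0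

def pvBSig (family : List (List Int)) (probe_mask : Int) (projection : String) : PvSig :=
  let restricted := family.filter (fun e => PySem.Int.band (pvBMask e) probe_mask = pvBMask e)
  if projection = "answer" then
    PvSig.ans (if restricted = [] then "blocked" else "feasible")
  else if projection = "variable" then
    PvSig.var (if restricted = [] then []
               else PySem.List.sorted (PySem.Set.ofList restricted.flatten) (fun x => x) false)
  else if projection = "family" then PvSig.fam restricted
  else PvSig.err                               -- unknown projection: Python raises (outside Pre_)

-- [i for i in range(len(ra)) if ra[i] != rb[i]]  (index always in range: pyGetD is exact)
def pvDiffIdxs (ra rb : List PvSig) : List Int :=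
  (PySem.List.pyRange 0 ra.length 1).filter
    (fun j => PySem.List.pyGetD ra j PvSig.err ≠ PySem.List.pyGetD rb j PvSig.err)

def pvPairMark : List (List PvSig) → PySem.Set Int → PySem.Set Int
  | [], marked => marked
  | ra :: rest, marked =>
      pvPairMark rest (rest.foldl (fun acc rb =>
        let diffs := pvDiffIdxs ra rb
        if diffs.length = 1 then PySem.Set.add acc (diffs.headD 0) else acc) marked)

def basis_exact_and_essential_alt (families : List (List (List Int))) (probe_masks : List Int) (projection : String) (p : Int) : List (String × Bool) :=
  let rows := families.map (fun fam => probe_masks.map (fun m => pvBSig fam m projection))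
  let exact := if probe_masks ≠ [] then
      decide ((PySem.Set.ofList rows).length = families.length)
    else decide (families.length ≤ 1)
  let essential := if exact then
      decide ((pvPairMark rows PySem.Set.empty).length = probe_masks.length)
    else false
  [("exact", exact), ("essential", essential)]

-- ===== PRECONDITION & SPEC =====
-- Pre_ excludes exactly the inputs where the Python raises: with at least one probe and one
-- family it calls the projection dispatch (ValueError on an unknown projection) and shifts
-- 1 << (item-1) for every edge member (ValueError on item ≤ 0).
def Pre_basis_exact_and_essential (families : List (List (List Int))) (probe_masks : List Int) (projection : String) (p : Int) : Prop :=
  probe_masks = [] ∨ families = [] ∨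
    ((projection = "answer" ∨ projection = "variable" ∨ projection = "family") ∧
      ∀ fam ∈ families, ∀ e ∈ fam, ∀ x ∈ e, 1 ≤ x)
instance (families : List (List (List Int))) (probe_masks : List Int) (projection : String) (p : Int) : Decidable (Pre_basis_exact_and_essential families probe_masks projection p) := by unfold Pre_basis_exact_and_essential; infer_instance

def pvWitness_basis_exact_and_essential : List (List (List Int)) × List Int × String × Int :=
  ([[[1]], [[2]]], [1, 2], "answer", 0)

-- On inputs with exactly one family and exactly one probe mask A returns essential=True (its
-- leave-one-out test compares zip() of no columns, 0 != 1), although by A's own zero-probe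
-- convention a single family is distinguished with no probes at all, so the lone probe is not
-- needed; B returns essential=False, the intended value.
def D_basis_exact_and_essential (families : List (List (List Int))) (probe_masks : List Int) (projection : String) (p : Int) : Prop :=
  families.length = 1 ∧ probe_masks.length = 1
instance (families : List (List (List Int))) (probe_masks : List Int) (projection : String) (p : Int) : Decidable (D_basis_exact_and_essential families probe_masks projection p) := by unfold D_basis_exact_and_essential; infer_instance

def Spec_basis_exact_and_essential (families : List (List (List Int))) (probe_masks : List Int) (projection : String) (p : Int) (out : List (String × Bool)) : Prop := ¬ D_basis_exact_and_essential families probe_masks projection p → out = basis_exact_and_essential_alt families probe_masks projection p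
instance (families : List (List (List Int))) (probe_masks : List Int) (projection : String) (p : Int) (out : List (String × Bool)) : Decidable (Spec_basis_exact_and_essential families probe_masks projection p out) := by unfold Spec_basis_exact_and_essential; infer_instance

def pvDiffWitness_basis_exact_and_essential : List (List (List Int)) × List Int × String × Int :=
  ([[[1]]], [1], "answer", 0)
def pvDiffWitnessOut_basis_exact_and_essential : (List (String × Bool)) × (List (String × Bool)) :=
  ([("exact", true), ("essential", true)], [("exact", true), ("essential", false)])

-- ===== CLAIM (what is proved, stated in full; the proofs are below) =====
def Claim_unchanged_basis_exact_and_essential : Prop := ∀ (families : List (List (List Int))) (probe_masks : List Int) (projection : String) (p : Int), Dom_basis_exact_and_essential families probe_masks projection p → Pre_basis_exact_and_essential families probe_masks projection p → Spec_basis_exact_and_essential families probe_masks projection p (basis_exact_and_essential families probe_masks projection p)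
def Claim_changed_basis_exact_and_essential : Prop := Dom_basis_exact_and_essential (pvDiffWitness_basis_exact_and_essential.1) (pvDiffWitness_basis_exact_and_essential.2.1) (pvDiffWitness_basis_exact_and_essential.2.2.1) (pvDiffWitness_basis_exact_and_essential.2.2.2) ∧ Pre_basis_exact_and_essential (pvDiffWitness_basis_exact_and_essential.1) (pvDiffWitness_basis_exact_and_essential.2.1) (pvDiffWitness_basis_exact_and_essential.2.2.1) (pvDiffWitness_basis_exact_and_essential.2.2.2) ∧ D_basis_exact_and_essential (pvDiffWitness_basis_exact_and_essential.1) (pvDiffWitness_basis_exact_and_essential.2.1) (pvDiffWitness_basis_exact_and_essential.2.2.1) (pvDiffWitness_basis_exact_and_essential.2.2.2) ∧ basis_exact_and_essential (pvDiffWitness_basis_exact_and_essential.1) (pvDiffWitness_basis_exact_and_essential.2.1) (pvDiffWitness_basis_exact_and_essential.2.2.1) (pvDiffWitness_basis_exact_and_essential.2.2.2) = pvDiffWitnessOut_basis_exact_and_essential.1 ∧ basis_exact_and_essential_alt (pvDiffWitness_basis_exact_and_essential.1) (pvDiffWitness_basis_exact_and_essential.2.1) (pvDiffWitness_basis_exact_and_essential.2.2.1)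 (pvDiffWitness_basis_exact_and_essential.2.2.2) = pvDiffWitnessOut_basis_exact_and_essential.2 ∧ pvDiffWitnessOut_basis_exact_and_essential.1 ≠ pvDiffWitnessOut_basis_exact_and_essential.2
def Claim_exact_basis_exact_and_essential : Prop := ∀ (families : List (List (List Int))) (probe_masks : List Int) (projection : String) (p : Int), Dom_basis_exact_and_essential families probe_masks projection p → Pre_basis_exact_and_essential families probe_masks projection p → D_basis_exact_and_essential families probe_masks projection p → basis_exact_and_essential families probe_masks projection p ≠ basis_exact_and_essential_alt families probe_masks projection p

-- ===== LEMMAS AND PROOFS =====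

-- the single-probe contraction A takes element [0] of is exactly B's signature element
theorem pv_elem_eq (family : List (List Int)) (m : Int) (projection : String) (p : Int) :
    (contract_projection_signature family [m] projection p).headD PvSig.err
      = pvBSig family m projection := rfl

theorem pv_zipWith_map_map {α β γ δ : Type} (f : β → γ → δ) (l : List α) (u : α → β) (v : α → γ) :
    List.zipWith f (l.map u) (l.map v) = l.map (fun x => f (u x) (v x)) := by
  induction l with
  | nil => rfl
  | cons x xs ih => simp [ih]

-- zip(*·) of a probe-major grid is the family-major grid (nonempty probe list)
theorem pv_zipStar_grid {α : Type} (g : α → Int → PvSig) :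
    ∀ (probes : List Int) (fams : List α), probes ≠ [] →
      pvZipStar (probes.map (fun m => fams.map (fun f => g f m)))
        = fams.map (fun f => probes.map (fun m => g f m)) := by
  intro probes
  induction probes with
  | nil => intro fams h; exact absurd rfl h
  | cons m rest ih =>
    intro fams _
    cases rest with
    | nil => simp [pvZipStar, List.map_map]
    | cons m' rest' =>
      have hr : (m' :: rest') ≠ [] := by simp
      simp only [List.map_cons, pvZipStar]
      have hih := ih fams hr
      simp only [List.map_cons] at hih
      rw [hih]
      exact pv_zipWith_map_map (fun x1 x2 => x1 :: x2) fams (fun f => g f m)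
        (fun f => g f m' :: List.map (fun m => g f m) rest')

-- |set(l)| = |l| iff l has no duplicates
theorem pv_ofList_length_eq_iff {α : Type} [BEq α] [LawfulBEq α] [DecidableEq α] (l : List α) :
    (PySem.Set.ofList l).length = l.length ↔ l.Nodup := by
  constructor
  · intro h
    have hperm : (PySem.Set.ofList l).Perm l.dedup := by
      rw [List.perm_ext_iff_of_nodup (PySem.Set.nodup_ofList l) l.nodup_dedup]
      intro a; simp [PySem.Set.mem_ofList, List.mem_dedup]
    have hlen : l.dedup.length = l.length := by rw [← hperm.length_eq, h]
    exact List.dedup_eq_self.mp ((l.dedup_sublist).eq_of_length hlen)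
  · intro h; rw [PySem.Set.ofList_eq_self_of_nodup _ h]

theorem pv_enum_filter_ne_aux {α : Type} (l : List α) :
    ∀ (i : Nat) (s : Int),
      ((PySem.List.enumerate l s).filter (fun ci => ci.1 ≠ s + (i : Int))).map (·.2)
        = l.eraseIdx i := by
  induction l with
  | nil => intro i s; simp [PySem.List.enumerate_nil]
  | cons x xs ih =>
    intro i s
    rw [PySem.List.enumerate_cons]
    cases i with
    | zero =>
      have hhead : (decide (s ≠ s + ((0 : Nat) : Int))) = false := by simp
      simp only [List.filter_cons, hhead, List.eraseIdx_cons_zero]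
      have : (PySem.List.enumerate xs (s + 1)).filter (fun ci => ci.1 ≠ s + ((0 : Nat) : Int))
          = PySem.List.enumerate xs (s + 1) := by
        apply List.filter_eq_self.mpr
        intro q hq
        rcases (PySem.List.mem_enumerate_iff _ _ _).mp hq with ⟨k, hk, rfl⟩
        simp only [decide_eq_true_eq]
        omega
      rw [if_neg (by simp), this, PySem.List.map_snd_enumerate]
    | succ j =>
      have hhead : (decide (s ≠ s + ((j + 1 : Nat) : Int))) = true := by
        simp only [decide_eq_true_eq]; push_cast; omega
      simp only [List.filter_cons, hhead, List.eraseIdx_cons_succ]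
      rw [if_pos trivial]
      simp only [List.map_cons]
      have hpred : (fun (ci : Int × α) => decide (ci.1 ≠ s + ((j + 1 : Nat) : Int)))
          = (fun ci => decide (ci.1 ≠ (s + 1) + (j : Int))) := by
        funext ci; congr 1; push_cast; ring_nf
      rw [hpred, ih j (s + 1)]

-- the enumerate/filter/map A removes a column with is List.eraseIdx
theorem pv_enum_filter_ne {α : Type} (l : List α) (i : Nat) :
    ((PySem.List.enumerate l).filter (fun ci => ci.1 ≠ (i : Int))).map (·.2) = l.eraseIdx i := by
  simpa using pv_enum_filter_ne_aux l i 0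

theorem pv_pair_sublist_cons {α : Type} (r s x : α) (xs : List α) :
    List.Sublist [r, s] (x :: xs) ↔ (r = x ∧ s ∈ xs) ∨ List.Sublist [r, s] xs := by
  constructor
  · intro h
    rcases h with _ | _ | _
    · rename_i h; right; exact h
    · rename_i h; left; exact ⟨rfl, (List.singleton_sublist).mp h⟩
  · rintro (⟨rfl, hs⟩ | h)
    · exact List.Sublist.cons₂ _ ((List.singleton_sublist).mpr hs)
    · exact h.cons _

-- a mapped list has a duplicate iff two (ordered) entries get equal images
theorem pv_not_nodup_map_iff {α β : Type} (f : α → β) :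
    ∀ (l : List α), ¬ (l.map f).Nodup ↔ ∃ r s, List.Sublist [r, s] l ∧ f r = f s := by
  intro l
  induction l with
  | nil => simp
  | cons x xs ih =>
    simp only [List.map_cons, List.nodup_cons, not_and_or, ih]
    constructor
    · rintro (h | ⟨r, s, hsub, heq⟩)
      · rw [not_not] at h
        simp only [List.mem_map] at h
        obtain ⟨a, ha, heq⟩ := h
        exact ⟨x, a, (pv_pair_sublist_cons _ _ _ _).mpr (Or.inl ⟨rfl, ha⟩), heq.symm⟩
      · exact ⟨r, s, hsub.cons _, heq⟩
    · rintro ⟨r, s, hsub, heq⟩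
      rcases (pv_pair_sublist_cons _ _ _ _).mp hsub with ⟨rfl, hs⟩ | h
      · left; rw [not_not]
        exact heq ▸ List.mem_map_of_mem hs
      · right; exact ⟨r, s, h, heq⟩

theorem pv_mem_diffIdxs (r s : List PvSig) (x : Int) :
    x ∈ pvDiffIdxs r s ↔ 0 ≤ x ∧ x < r.length ∧
      PySem.List.pyGetD r x PvSig.err ≠ PySem.List.pyGetD s x PvSig.err := by
  simp [pvDiffIdxs, List.mem_filter, PySem.List.mem_pyRange_one, and_assoc]

theorem pv_nodup_diffIdxs (r s : List PvSig) : (pvDiffIdxs r s).Nodup :=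
  (PySem.List.nodup_pyRange_one _ _).filter _

theorem pv_nodup_eq_singleton_iff {α : Type} (l : List α) (hl : l.Nodup) (a : α) :
    l = [a] ↔ a ∈ l ∧ ∀ b ∈ l, b = a := by
  constructor
  · rintro rfl; simp
  · rintro ⟨ha, hall⟩
    cases l with
    | nil => simp at ha
    | cons y ys =>
      have hy : y = a := hall y (by simp)
      subst hy
      cases ys with
      | nil => rfl
      | cons z zs =>
        have hz : z = y := hall z (by simp)
        simp [hz] at hl

theorem pv_pyGetD_eq_some (r : List PvSig) (j : Nat) (hj : j < r.length) :
    PySem.List.pyGetD r (j : Int) PvSig.err = r[j] := by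
  rw [PySem.List.pyGetD_natCast]
  simp [List.getD_eq_getElem?_getD, List.getElem?_eq_getElem hj]

theorem pv_erase_eq_iff_off (P : Nat) (i : Nat) (hi : i < P)
    (r s : List PvSig) (hr : r.length = P) (hs : s.length = P) :
    r.eraseIdx i = s.eraseIdx i ↔ ∀ j : Nat, j ≠ i → r[j]? = s[j]? := by
  constructor
  · intro h j hji
    rcases Nat.lt_or_ge j i with hlt | hge
    · have h1 : (r.eraseIdx i)[j]? = r[j]? := by rw [List.getElem?_eraseIdx]; simp [hlt]
      have h2 : (s.eraseIdx i)[j]? = s[j]? := by rw [List.getElem?_eraseIdx]; simp [hlt]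
      rw [← h1, ← h2, h]
    · obtain ⟨k, rfl⟩ : ∃ k, j = k + 1 := ⟨j - 1, by omega⟩
      have hki : ¬ k < i := by omega
      have h1 : (r.eraseIdx i)[k]? = r[k+1]? := by rw [List.getElem?_eraseIdx]; simp [hki]
      have h2 : (s.eraseIdx i)[k]? = s[k+1]? := by rw [List.getElem?_eraseIdx]; simp [hki]
      rw [← h1, ← h2, h]
  · intro h
    apply List.ext_getElem?
    intro n
    rw [List.getElem?_eraseIdx, List.getElem?_eraseIdx]
    by_cases hn : n < i
    · simp only [hn, if_pos]
      exact h n (by omega)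
    · simp only [hn, if_false]
      exact h (n + 1) (by omega)

-- rows of equal length collide after dropping position i exactly when they differ solely at i
theorem pv_erase_eq_iff_diff_single (P : Nat) (i : Nat) (hi : i < P) :
    ∀ (r s : List PvSig), r.length = P → s.length = P →
      ((r.eraseIdx i = s.eraseIdx i ∧ r ≠ s) ↔ pvDiffIdxs r s = [(i : Int)]) := by
  intro r s hr hs
  rw [pv_nodup_eq_singleton_iff _ (pv_nodup_diffIdxs r s)]
  constructor
  · rintro ⟨herase, hne⟩
    have hoff : ∀ j : Nat, j ≠ i → r[j]? = s[j]? :=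
      (pv_erase_eq_iff_off P i hi r s hr hs).mp herase
    have hdiffi : r[i]? ≠ s[i]? := by
      intro hsame
      apply hne
      apply List.ext_getElem?
      intro j
      by_cases hji : j = i
      · subst hji; exact hsame
      · exact hoff j hji
    constructor
    · rw [pv_mem_diffIdxs]
      refine ⟨by omega, by omega, ?_⟩
      rw [pv_pyGetD_eq_some r i (by omega), pv_pyGetD_eq_some s i (by omega)]
      intro h
      exact hdiffi (by rw [List.getElem?_eq_getElem (by omega), List.getElem?_eq_getElem (by omega), h])
    · intro b hb
      rw [pv_mem_diffIdxs] at hb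
      obtain ⟨hb0, hblt, hbne⟩ := hb
      by_contra hbne'
      apply hbne
      have hbnat : b = ((b.toNat : Nat) : Int) := by omega
      rw [hbnat, pv_pyGetD_eq_some r b.toNat (by omega), pv_pyGetD_eq_some s b.toNat (by omega)]
      have hbi : b.toNat ≠ i := by omega
      have := hoff b.toNat hbi
      rw [List.getElem?_eq_getElem (by omega), List.getElem?_eq_getElem (by omega)] at this
      injection this
  · rintro ⟨hmem, hall⟩
    rw [pv_mem_diffIdxs] at hmem
    obtain ⟨_, hilt, hine⟩ := hmem
    have hoff : ∀ j : Nat, j ≠ i → r[j]? = s[j]? := by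
      intro j hji
      by_cases hjlt : j < P
      · by_contra hne
        have hjmem : ((j : Nat) : Int) ∈ pvDiffIdxs r s := by
          rw [pv_mem_diffIdxs]
          refine ⟨by omega, by omega, ?_⟩
          rw [pv_pyGetD_eq_some r j (by omega), pv_pyGetD_eq_some s j (by omega)]
          intro h
          exact hne (by rw [List.getElem?_eq_getElem (by omega), List.getElem?_eq_getElem (by omega), h])
        have hj := hall _ hjmem
        have : j = i := by exact_mod_cast hj
        exact hji this
      · rw [List.getElem?_eq_none (by omega), List.getElem?_eq_none (by omega)]
    constructor
    · exact (pv_erase_eq_iff_off P i hi r s hr hs).mpr hoff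
    · intro hrs
      subst hrs
      exact hine rfl

theorem pv_mem_foldl_mark (ra : List PvSig) (x : Int) :
    ∀ (l : List (List PvSig)) (acc : PySem.Set Int),
      x ∈ l.foldl (fun acc rb =>
        let diffs := pvDiffIdxs ra rb
        if diffs.length = 1 then PySem.Set.add acc (diffs.headD 0) else acc) acc
        ↔ x ∈ acc ∨ ∃ rb ∈ l, pvDiffIdxs ra rb = [x] := by
  intro l
  induction l with
  | nil => simp
  | cons rb rest ih =>
    intro acc
    simp only [List.foldl_cons, ih]
    by_cases h : (pvDiffIdxs ra rb).length = 1
    · have hsing : pvDiffIdxs ra rb = [(pvDiffIdxs ra rb).headD 0] := by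
        cases hd : pvDiffIdxs ra rb with
        | nil => rw [hd] at h; simp at h
        | cons a t => rw [hd] at h; simp at h; simp [h]
      simp only [h, if_pos, PySem.Set.mem_add]
      constructor
      · rintro ((hx | hx) | hx)
        · exact Or.inl hx
        · right; exact ⟨rb, by simp, by rw [hsing, hx]⟩
        · rcases hx with ⟨rb', hrb', hx⟩; right; exact ⟨rb', by simp [hrb'], hx⟩
      · rintro (hx | ⟨rb', hrb', hx⟩)
        · exact Or.inl (Or.inl hx)
        · rcases List.mem_cons.mp hrb' with rfl | hmem
          · left; right; simp [hx]
          · right; exact ⟨rb', hmem, hx⟩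
    · simp only [h, if_false]
      constructor
      · rintro (hx | ⟨rb', hrb', hx⟩)
        · exact Or.inl hx
        · right; exact ⟨rb', by simp [hrb'], hx⟩
      · rintro (hx | ⟨rb', hrb', hx⟩)
        · exact Or.inl hx
        · rcases List.mem_cons.mp hrb' with rfl | hmem
          · exfalso; apply h; rw [hx]; rfl
          · right; exact ⟨rb', hmem, hx⟩

-- membership in the pairwise sweep's marked set
theorem pv_mem_pairMark (x : Int) :
    ∀ (l : List (List PvSig)) (acc : PySem.Set Int),
      x ∈ pvPairMark l acc ↔ x ∈ acc ∨ ∃ r s, List.Sublist [r, s] l ∧ pvDiffIdxs r s = [x] := by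
  intro l
  induction l with
  | nil => intro acc; simp [pvPairMark]
  | cons ra rest ih =>
    intro acc
    simp only [pvPairMark, ih, pv_mem_foldl_mark]
    constructor
    · rintro ((hx | ⟨rb, hrb, hx⟩) | ⟨r, s, hsub, hx⟩)
      · exact Or.inl hx
      · right; exact ⟨ra, rb, (pv_pair_sublist_cons _ _ _ _).mpr (Or.inl ⟨rfl, hrb⟩), hx⟩
      · right; exact ⟨r, s, hsub.cons _, hx⟩
    · rintro (hx | ⟨r, s, hsub, hx⟩)
      · exact Or.inl (Or.inl hx)
      · rcases (pv_pair_sublist_cons _ _ _ _).mp hsub with ⟨rfl, hs⟩ | hsub'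
        · left; right; exact ⟨s, hs, hx⟩
        · right; exact ⟨r, s, hsub', hx⟩

theorem pv_nodup_pairMark :
    ∀ (l : List (List PvSig)) (acc : PySem.Set Int), acc.Nodup → (pvPairMark l acc).Nodup := by
  intro l
  induction l with
  | nil => intro acc h; exact h
  | cons ra rest ih =>
    intro acc hacc
    apply ih
    generalize acc = a at hacc
    clear ih
    induction rest generalizing a with
    | nil => exact hacc
    | cons rb rest' ih2 =>
      simp only [List.foldl_cons]
      apply ih2
      by_cases h : (pvDiffIdxs ra rb).length = 1
      · simp only [h, if_pos]
        apply PySem.Set.nodup_add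
        exact hacc
      · simpa [h] using hacc

-- a duplicate-free sublist-of-members has full length iff it exhausts the reference list
theorem pv_nodup_subset_length_iff {α : Type} (l R : List α) (hl : l.Nodup) (hR : R.Nodup)
    (hsub : ∀ x ∈ l, x ∈ R) : l.length = R.length ↔ ∀ x ∈ R, x ∈ l := by
  have hsp : List.Subperm l R := List.subperm_of_subset hl hsub
  constructor
  · intro h x hx
    exact ((List.Subperm.perm_of_length_le hsp (le_of_eq h.symm)).mem_iff).mpr hx
  · intro h
    have hsp2 : List.Subperm R l := List.subperm_of_subset hR h
    exact le_antisymm hsp.length_le hsp2.length_le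

-- A's break loop is an all-scan
theorem pv_aLoop_eq_all (cols : List (List PvSig)) (nfam : Nat) :
    ∀ (l : List Nat), pvALoop cols nfam l
      = l.all (fun i =>
          !(decide ((PySem.Set.ofList (pvZipStar
              (((PySem.List.enumerate cols).filter (fun ci => ci.1 ≠ (i : Int))).map (·.2)))).length = nfam))) := by
  intro l
  induction l with
  | nil => rfl
  | cons i rest ih =>
    simp only [pvALoop, List.all_cons]
    split
    next h => rw [decide_eq_true h]; rfl
    next h => rw [ih, decide_eq_false h]; rfl

-- an all-[] row list marks nothing
theorem pv_pairMark_nil_rows (l : List (List PvSig)) (hl : ∀ r ∈ l, r = []) :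
    pvPairMark l PySem.Set.empty = [] := by
  rw [List.eq_nil_iff_forall_not_mem]
  intro x hx
  rcases (pv_mem_pairMark x l PySem.Set.empty).mp hx with h | ⟨r, s, hsub, hd⟩
  · simp [PySem.Set.empty] at h
  · have hr : r ∈ l := hsub.subset (by simp)
    have : pvDiffIdxs r s = [] := by
      rw [hl r hr]
      simp [pvDiffIdxs, PySem.List.pyRange_one_eq_nil]
    rw [this] at hd
    exact absurd hd (by simp)

-- ===== VERDICT (by name: the statement is the Claim_ definition above) =====
theorem basis_exact_and_essential_spec : Claim_unchanged_basis_exact_and_essential := by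
  unfold Claim_unchanged_basis_exact_and_essential
  intro families probes projection p _dom _pre
  unfold Spec_basis_exact_and_essential
  intro hND
  unfold basis_exact_and_essential basis_exact_and_essential_alt
  simp only [pv_elem_eq]
  by_cases hP : probes = []
  · subst hP
    have hB : pvPairMark (families.map (fun fam => List.map (fun m => pvBSig fam m projection) []))
        PySem.Set.empty = [] :=
      pv_pairMark_nil_rows _ (by intro r hr; rcases List.mem_map.mp hr with ⟨a, _, rfl⟩; rfl)
    simp only [hB]
    rfl
  · rw [if_pos hP, if_pos hP]
    have hz := pv_zipStar_grid (fun f m => pvBSig f m projection) probes families hP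
    simp only [] at hz
    simp only [hz]
    set rows := families.map (fun f => probes.map (fun m => pvBSig f m projection)) with hrows
    set cols := probes.map (fun m => families.map (fun f => pvBSig f m projection)) with hcols
    have hlenrows : rows.length = families.length := by rw [hrows]; simp
    have hcolslen : cols.length = probes.length := by rw [hcols]; simp
    by_cases hex : (PySem.Set.ofList rows).length = families.length
    · have hnodup : rows.Nodup := (pv_ofList_length_eq_iff rows).mp (hex.trans hlenrows.symm)
      have hrl : ∀ r ∈ rows, r.length = probes.length := by
        intro r hr
        rw [hrows] at hr
        rcases List.mem_map.mp hr with ⟨f, _, rfl⟩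
        simp
      set marked := pvPairMark rows PySem.Set.empty with hmarked
      have hmnodup : marked.Nodup := pv_nodup_pairMark _ _ (by simp [PySem.Set.empty])
      have hmsub : ∀ x ∈ marked, x ∈ PySem.List.pyRange 0 probes.length 1 := by
        intro x hx
        rcases (pv_mem_pairMark x rows _).mp hx with h | ⟨r, s, hsub, hd⟩
        · simp [PySem.Set.empty] at h
        · have hr : r ∈ rows := hsub.subset (by simp)
          have hxd : x ∈ pvDiffIdxs r s := by rw [hd]; simp
          rw [pv_mem_diffIdxs] at hxd
          have hrlen := hrl r hr
          rw [PySem.List.mem_pyRange_one]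
          omega
      have hcover : marked.length = probes.length ↔
          ∀ i : Nat, i < probes.length → (i : Int) ∈ marked := by
        have hlenR : (PySem.List.pyRange 0 (probes.length : Int) 1).length = probes.length := by
          rw [PySem.List.length_pyRange_one]; omega
        rw [← hlenR, pv_nodup_subset_length_iff marked _ hmnodup
          (PySem.List.nodup_pyRange_one _ _) hmsub]
        constructor
        · intro h i hi
          exact h _ (by rw [PySem.List.mem_pyRange_one]; omega)
        · intro h x hxR
          rw [PySem.List.mem_pyRange_one] at hxR
          have hx0 : x = ((x.toNat : Nat) : Int) := by omega
          rw [hx0]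
          exact h x.toNat (by omega)
      have key : ∀ i : Nat, i < probes.length →
          (((PySem.Set.ofList (pvZipStar (((PySem.List.enumerate cols).filter
              (fun ci => ci.1 ≠ (i : Int))).map (·.2)))).length = families.length)
            ↔ ((i : Int) ∉ marked)) := by
        intro i hi
        rw [pv_enum_filter_ne, hcols, List.eraseIdx_map]
        by_cases hP1 : probes.length = 1
        · have hi0 : i = 0 := by omega
          subst hi0
          have hpe : probes.eraseIdx 0 = [] := by
            cases probes with
            | nil => rfl
            | cons a t => cases t with
              | nil => rfl
              | cons b t2 => simp at hP1
          rw [hpe]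
          simp only [List.map_nil]
          constructor
          · intro h0
            have hF0 : families.length = 0 := h0.symm
            have hrows0 : rows = [] := List.length_eq_zero_iff.mp (by omega)
            rw [hmarked, hrows0]
            intro hmem
            rcases (pv_mem_pairMark _ _ _).mp hmem with h | ⟨r, s, hsub, _⟩
            · simp [PySem.Set.empty] at h
            · simp at hsub
          · intro hnotmem
            by_contra hne
            have hF : families.length ≠ 0 := fun h0 => hne h0.symm
            have hFne1 : families.length ≠ 1 := fun h1 => hND ⟨h1, hP1⟩
            have h2 : 2 ≤ rows.length := by omega
            rcases rows with _ | ⟨r1, t⟩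
            · simp at h2
            rcases t with _ | ⟨r2, t2⟩
            · simp at h2
            have hsub : List.Sublist [r1, r2] (r1 :: r2 :: t2) :=
              ((List.nil_sublist t2).cons₂ r2).cons₂ r1
            have hr1 : r1.length = 1 := (hrl r1 (by simp)).trans hP1
            have hr2 : r2.length = 1 := (hrl r2 (by simp)).trans hP1
            have hne12 : r1 ≠ r2 := by
              have := hnodup
              rw [List.nodup_cons] at this
              intro hc
              exact this.1 (hc ▸ List.mem_cons_self)
            have hsingerase : ∀ r : List PvSig, r.length = 1 → r.eraseIdx 0 = [] := by
              intro r h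
              cases r with
              | nil => rfl
              | cons a t => cases t with
                | nil => rfl
                | cons b t2 => simp at h
            have herase : r1.eraseIdx 0 = r2.eraseIdx 0 := by
              rw [hsingerase r1 hr1, hsingerase r2 hr2]
            have hd := (pv_erase_eq_iff_diff_single 1 0 (by omega) r1 r2 hr1 hr2).mp
              ⟨herase, hne12⟩
            exact hnotmem ((pv_mem_pairMark _ _ _).mpr (Or.inr ⟨r1, r2, hsub, hd⟩))
        · have hlen2 : (probes.eraseIdx i).length = probes.length - 1 :=
            List.length_eraseIdx_of_lt hi
          have hPne : probes.eraseIdx i ≠ [] := by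
            intro h
            rw [h] at hlen2
            simp at hlen2
            omega
          have hz2 := pv_zipStar_grid (fun f m => pvBSig f m projection)
            (probes.eraseIdx i) families hPne
          simp only [] at hz2
          rw [hz2]
          have hmap : families.map (fun f => (probes.eraseIdx i).map
              (fun m => pvBSig f m projection)) = rows.map (fun r => r.eraseIdx i) := by
            rw [hrows, List.map_map]
            simp only [Function.comp_def, List.eraseIdx_map]
          rw [hmap]
          have hmlen : (rows.map (fun r => r.eraseIdx i)).length = families.length := by
            simp [hlenrows]
          rw [← hmlen, pv_ofList_length_eq_iff]
          constructor
          · intro hnd hcon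
            rcases (pv_mem_pairMark _ _ _).mp hcon with h | ⟨r, s, hsub, hd⟩
            · simp [PySem.Set.empty] at h
            · have hpair := (pv_erase_eq_iff_diff_single probes.length i hi r s
                (hrl r (hsub.subset (by simp))) (hrl s (hsub.subset (by simp)))).mpr hd
              exact (pv_not_nodup_map_iff _ rows).mpr ⟨r, s, hsub, hpair.1⟩ hnd
          · intro hnm
            by_contra hnnd
            rcases (pv_not_nodup_map_iff _ rows).mp hnnd with ⟨r, s, hsub, heq⟩
            have hrs : r ≠ s := by
              have hnd2 : ([r, s] : List (List PvSig)).Nodup := hnodup.sublist hsub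
              rw [List.nodup_cons] at hnd2
              intro hc
              exact hnd2.1 (hc ▸ List.mem_cons_self)
            have hd := (pv_erase_eq_iff_diff_single probes.length i hi r s
              (hrl r (hsub.subset (by simp))) (hrl s (hsub.subset (by simp)))).mp ⟨heq, hrs⟩
            exact hnm ((pv_mem_pairMark _ _ _).mpr (Or.inr ⟨r, s, hsub, hd⟩))
      rw [decide_eq_true hex]
      show [("exact", true), ("essential", pvALoop cols families.length (List.range cols.length))]
        = [("exact", true), ("essential", decide (marked.length = probes.length))]
      have hess : pvALoop cols families.length (List.range cols.length)
          = decide (marked.length = probes.length) := by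
        rw [pv_aLoop_eq_all, hcolslen, Bool.eq_iff_iff]
        simp only [List.all_eq_true, List.mem_range, Bool.not_eq_true', decide_eq_false_iff_not,
          decide_eq_true_eq]
        constructor
        · intro h
          exact hcover.mpr (fun i hi => not_not.mp (fun hc => h i hi ((key i hi).mpr hc)))
        · intro h i hi
          rw [key i hi]
          exact not_not_intro (hcover.mp h i hi)
      rw [hess]
    · rw [decide_eq_false hex]
      rfl

theorem basis_exact_and_essential_changed : Claim_changed_basis_exact_and_essential := by
  unfold Claim_changed_basis_exact_and_essential; decide

theorem basis_exact_and_essential_tight : Claim_exact_basis_exact_and_essential := by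
  unfold Claim_exact_basis_exact_and_essential
  intro families probes projection p _dom _pre hD
  obtain ⟨hF, hP⟩ := hD
  rcases families with _ | ⟨f, tf⟩
  · simp at hF
  rcases tf with _ | ⟨f2, tf2⟩
  · rcases probes with _ | ⟨m, tm⟩
    · simp at hP
    rcases tm with _ | ⟨m2, tm2⟩
    · intro heq
      have hA : basis_exact_and_essential [f] [m] projection p
          = [("exact", true), ("essential", true)] := rfl
      have hB : basis_exact_and_essential_alt [f] [m] projection p
          = [("exact", true), ("essential", false)] := rfl
      rw [hA, hB] at heq
      simp at heq
    · simp at hP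
  · simp at hF
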